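-- pv_equiv track=rewrite | github.com/BoHan-LIN04/PaperCode | soft_prompt/src/soft_prompt_repro/tasks.py | canonicalize_class_prediction
-- ===== SOURCE A (Python) =====
-- def _clean(text: str) -> str:
--     return " ".join(str(text).strip().split())
--
-- def canonicalize_class_prediction(prediction: str, labels: list[str]) -> str:
--     normalized = _clean(prediction).lower()
--     if normalized in labels:
--         return normalized
--     for label in labels:
--         if normalized.startswith(label):
--             return label
--     for label in labels:
--         if label in normalized:
--             return label
--     return normalized
-- ===== SOURCE B (Python) =====
-- def canonicalize_class_prediction(prediction: str, labels: list[str]) -> str: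
--     normalized = " ".join(str(prediction).strip().split()).lower()
--     best, best_label = 0, ""
--     for label in labels:
--         if label == normalized:
--             p = 3
--         elif normalized.startswith(label):
--             p = 2
--         elif label in normalized:
--             p = 1
--         else:
--             p = 0
--         if p > best:
--             best, best_label = p, label
--     return normalized if best in (3, 0) else best_label
-- ===== Notes on version B (the rewrite author's own statement) =====
-- stated objective: alternative
-- what changed: Replaced the membership test plus two sequential scans over labels with a single pass that assigns each label a match priority (3 exact, 2 prefix, 1 substring, 0 none) and keeps the first label of strictly highest priority, returning normalized when that priority is 3 or 0.
import Mathlib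
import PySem

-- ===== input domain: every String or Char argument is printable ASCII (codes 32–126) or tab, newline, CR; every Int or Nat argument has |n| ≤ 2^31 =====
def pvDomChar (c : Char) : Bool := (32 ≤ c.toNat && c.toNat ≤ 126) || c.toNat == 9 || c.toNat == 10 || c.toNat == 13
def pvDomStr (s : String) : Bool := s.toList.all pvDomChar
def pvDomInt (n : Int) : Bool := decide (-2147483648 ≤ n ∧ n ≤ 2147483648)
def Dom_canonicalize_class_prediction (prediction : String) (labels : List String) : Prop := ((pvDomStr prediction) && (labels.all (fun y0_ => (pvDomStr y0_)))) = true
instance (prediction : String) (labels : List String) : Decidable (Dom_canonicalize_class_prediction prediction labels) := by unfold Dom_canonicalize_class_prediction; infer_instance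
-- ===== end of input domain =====

-- B replaces A's membership test plus two sequential scans with one strict-argmax pass
-- over per-label match priorities (alternative decomposition, same cost).

-- ===== PORT A =====
-- _clean(text) = " ".join(text.strip().split())  (shared by both ports, as in the Python)
def pvClean (text : String) : String :=
  PySem.Str.join " " (PySem.Str.split₀ (PySem.Str.strip text))

def canonicalize_class_prediction (prediction : String) (labels : List String) : String :=
  let normalized := PySem.Str.lower (pvClean prediction)
  if normalized ∈ labels then normalized
  else
    match labels.find? (fun label => PySem.Str.startswith normalized label) with
    | some label => label
    | none =>
      match labels.find? (fun label => PySem.Str.isIn label normalized) with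
      | some label => label
      | none => normalized

-- ===== PORT B =====
def pvPrio (normalized label : String) : Nat :=
  if label == normalized then 3
  else if PySem.Str.startswith normalized label then 2
  else if PySem.Str.isIn label normalized then 1
  else 0

def pvStep (normalized : String) (acc : Nat × String) (label : String) : Nat × String :=
  if acc.1 < pvPrio normalized label then (pvPrio normalized label, label) else acc

def canonicalize_class_prediction_alt (prediction : String) (labels : List String) : String :=
  let normalized := PySem.Str.lower (pvClean prediction)
  let best := labels.foldl (pvStep normalized) (0, "")
  if best.1 == 3 || best.1 == 0 then normalized else best.2

-- ===== PRECONDITION & SPEC =====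
def Spec_canonicalize_class_prediction (prediction : String) (labels : List String) (out : String) : Prop := out = canonicalize_class_prediction_alt prediction labels
instance (prediction : String) (labels : List String) (out : String) : Decidable (Spec_canonicalize_class_prediction prediction labels out) := by unfold Spec_canonicalize_class_prediction; infer_instance

-- ===== CLAIM (what is proved, stated in full; the proofs are below) =====
def Claim_equal_canonicalize_class_prediction : Prop := ∀ (prediction : String) (labels : List String), Dom_canonicalize_class_prediction prediction labels → Spec_canonicalize_class_prediction prediction labels (canonicalize_class_prediction prediction labels)

-- ===== LEMMAS AND PROOFS =====

theorem pvPrio_cases (n l : String) : pvPrio n l = 3 ∨ pvPrio n l = 2 ∨ pvPrio n l = 1 ∨ pvPrio n l = 0 := by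
  unfold pvPrio; split_ifs <;> simp

theorem pvPrio_le_three (n l : String) : pvPrio n l ≤ 3 := by
  rcases pvPrio_cases n l with h | h | h | h <;> omega

theorem pvPrio_eq_three_iff (n l : String) : pvPrio n l = 3 ↔ l = n := by
  unfold pvPrio; split_ifs with h1 h2 h3 <;> simp_all

theorem pvPrio_eq_two_iff (n l : String) (hne : l ≠ n) :
    pvPrio n l = 2 ↔ PySem.Str.startswith n l = true := by
  unfold pvPrio; split_ifs with h1 h2 h3 <;> simp_all

theorem pvPrio_eq_one_iff (n l : String) (hne : l ≠ n) (hsw : PySem.Str.startswith n l = false) :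
    pvPrio n l = 1 ↔ PySem.Str.isIn l n = true := by
  unfold pvPrio; split_ifs with h1 h2 h3 <;> simp_all

theorem pvFold_absorb (n : String) (t : List String) (acc : Nat × String)
    (h : ∀ l ∈ t, pvPrio n l ≤ acc.1) : t.foldl (pvStep n) acc = acc := by
  induction t with
  | nil => rfl
  | cons hd tl ih =>
    have hhd : pvPrio n hd ≤ acc.1 := h hd (by simp)
    simp only [List.foldl_cons]
    rw [show pvStep n acc hd = acc from by simp only [pvStep]; rw [if_neg (by omega)]]
    exact ih (fun l hl => h l (by simp [hl]))

theorem pvFold_top (n : String) (t : List String) :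
    ∀ acc : Nat × String, acc.1 ≤ 3 → (acc.1 = 3 ∨ ∃ l ∈ t, pvPrio n l = 3) →
      (t.foldl (pvStep n) acc).1 = 3 := by
  induction t with
  | nil => intro acc _ h; simpa using h.resolve_right (by simp)
  | cons hd tl ih =>
    intro acc hle h
    simp only [List.foldl_cons]
    by_cases hupd : acc.1 < pvPrio n hd
    · have hst : pvStep n acc hd = (pvPrio n hd, hd) := by simp only [pvStep]; rw [if_pos hupd]
      rw [hst]
      refine ih _ (pvPrio_le_three n hd) ?_
      rcases h with h3 | ⟨l, hl, hpl⟩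
      · exact Or.inl (by have := pvPrio_le_three n hd; omega)
      · rcases List.mem_cons.mp hl with rfl | hmem
        · exact Or.inl hpl
        · rcases pvPrio_cases n hd with hh | hh | hh | hh
          · exact Or.inl hh
          all_goals exact Or.inr ⟨l, hmem, hpl⟩
    · have hst : pvStep n acc hd = acc := by simp only [pvStep]; rw [if_neg hupd]
      rw [hst]
      refine ih _ hle ?_
      rcases h with h3 | ⟨l, hl, hpl⟩
      · exact Or.inl h3
      · rcases List.mem_cons.mp hl with rfl | hmem
        · exact Or.inl (by omega)
        · exact Or.inr ⟨l, hmem, hpl⟩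

theorem pvFold_first2 (n : String) (t : List String) :
    ∀ acc : Nat × String, (∀ l ∈ t, pvPrio n l ≤ 2) → acc.1 ≤ 1 →
      ∀ w, t.find? (fun l => pvPrio n l == 2) = some w →
      t.foldl (pvStep n) acc = (2, w) := by
  induction t with
  | nil => intro acc _ _ w hw; simp at hw
  | cons hd tl ih =>
    intro acc hle hacc w hw
    simp only [List.foldl_cons]
    by_cases hhd : pvPrio n hd = 2
    · have hwhd : hd = w := by
        rw [List.find?_cons_of_pos (by simp [hhd])] at hw
        exact Option.some_inj.mp hw
      rw [← hwhd]
      have hst : pvStep n acc hd = (2, hd) := by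
        simp only [pvStep]; rw [hhd]; rw [if_pos (by omega)]
      rw [hst]
      exact pvFold_absorb n tl (2, hd) (fun l hl => hle l (by simp [hl]))
    · rw [List.find?_cons_of_neg (by simp [hhd])] at hw
      have hhd1 : pvPrio n hd ≤ 1 := by have := hle hd (by simp); omega
      have hstep : (pvStep n acc hd).1 ≤ 1 := by
        simp only [pvStep]; split_ifs
        · exact hhd1
        · exact hacc
      exact ih _ (fun l hl => hle l (by simp [hl])) hstep w hw

theorem pvFold_first1 (n : String) (t : List String) :
    ∀ acc : Nat × String, (∀ l ∈ t, pvPrio n l ≤ 1) → acc.1 = 0 →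
      ∀ w, t.find? (fun l => pvPrio n l == 1) = some w →
      t.foldl (pvStep n) acc = (1, w) := by
  induction t with
  | nil => intro acc _ _ w hw; simp at hw
  | cons hd tl ih =>
    intro acc hle hacc w hw
    simp only [List.foldl_cons]
    by_cases hhd : pvPrio n hd = 1
    · have hwhd : hd = w := by
        rw [List.find?_cons_of_pos (by simp [hhd])] at hw
        exact Option.some_inj.mp hw
      rw [← hwhd]
      have hst : pvStep n acc hd = (1, hd) := by
        simp only [pvStep]; rw [hhd]; rw [if_pos (by omega)]
      rw [hst]
      exact pvFold_absorb n tl (1, hd) (fun l hl => hle l (by simp [hl]))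
    · rw [List.find?_cons_of_neg (by simp [hhd])] at hw
      have hhd0 : pvPrio n hd = 0 := by have := hle hd (by simp); omega
      have hstep : pvStep n acc hd = acc := by
        simp only [pvStep]; rw [hhd0, if_neg (by omega)]
      rw [hstep]
      exact ih _ (fun l hl => hle l (by simp [hl])) hacc w hw

theorem pvFind?_congr {α : Type} (p q : α → Bool) (t : List α)
    (h : ∀ l ∈ t, p l = q l) : t.find? p = t.find? q := by
  induction t with
  | nil => rfl
  | cons hd tl ih =>
    by_cases hp : p hd = true
    · rw [List.find?_cons_of_pos hp, List.find?_cons_of_pos (by rw [← h hd (by simp)]; exact hp)]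
    · rw [List.find?_cons_of_neg (by simpa using hp),
          List.find?_cons_of_neg (by rw [← h hd (by simp)]; simpa using hp)]
      exact ih (fun l hl => h l (by simp [hl]))

-- the core equivalence, with the normalized string abstracted
theorem pvKey (n : String) (labels : List String) :
    (if n ∈ labels then n else
      match labels.find? (fun label => PySem.Str.startswith n label) with
      | some label => label
      | none =>
        match labels.find? (fun label => PySem.Str.isIn label n) with
        | some label => label
        | none => n) =
    (let best := labels.foldl (pvStep n) (0, "")
     if best.1 == 3 || best.1 == 0 then n else best.2) := by
  by_cases h3 : ∃ l ∈ labels, pvPrio n l = 3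
  · have hmem : n ∈ labels := by
      obtain ⟨l, hl, hpl⟩ := h3
      rw [pvPrio_eq_three_iff] at hpl; exact hpl ▸ hl
    rw [if_pos hmem]
    have hfold : (labels.foldl (pvStep n) (0, "")).1 = 3 :=
      pvFold_top n labels (0, "") (by simp) (Or.inr h3)
    simp [hfold]
  · have hnmem : n ∉ labels := fun hmem => h3 ⟨n, hmem, (pvPrio_eq_three_iff n n).mpr rfl⟩
    have hne : ∀ l ∈ labels, l ≠ n := fun l hl heq => hnmem (heq ▸ hl)
    have hle2 : ∀ l ∈ labels, pvPrio n l ≤ 2 := fun l hl => by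
      rcases pvPrio_cases n l with h | h | h | h
      · exact absurd ⟨l, hl, h⟩ h3
      all_goals omega
    rw [if_neg hnmem]
    have hcongr2 : labels.find? (fun label => PySem.Str.startswith n label) =
        labels.find? (fun l => pvPrio n l == 2) := by
      refine pvFind?_congr _ _ _ (fun l hl => ?_)
      have := pvPrio_eq_two_iff n l (hne l hl)
      by_cases hs : PySem.Str.startswith n l = true <;> simp_all
    rw [hcongr2]
    rcases hfw : labels.find? (fun l => pvPrio n l == 2) with _ | w
    · -- no prefix match
      have hle1 : ∀ l ∈ labels, pvPrio n l ≤ 1 := fun l hl => by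
        have := hle2 l hl
        have h2 : pvPrio n l ≠ 2 := by
          have := List.find?_eq_none.mp hfw l hl; simpa using this
        omega
      have hcongr1 : labels.find? (fun label => PySem.Str.isIn label n) =
          labels.find? (fun l => pvPrio n l == 1) := by
        refine pvFind?_congr _ _ _ (fun l hl => ?_)
        have hsw : PySem.Str.startswith n l = false := by
          by_contra hc
          have hsw' : PySem.Str.startswith n l = true := by
            cases hx : PySem.Str.startswith n l <;> simp_all
          have : pvPrio n l = 2 := (pvPrio_eq_two_iff n l (hne l hl)).mpr hsw'
          have := List.find?_eq_none.mp hfw l hl; simp_all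
        have := pvPrio_eq_one_iff n l (hne l hl) hsw
        by_cases hs : PySem.Str.isIn l n = true <;> simp_all
      rw [hcongr1]
      rcases hfw1 : labels.find? (fun l => pvPrio n l == 1) with _ | w1
      · -- everything priority 0
        have h0 : ∀ l ∈ labels, pvPrio n l ≤ 0 := fun l hl => by
          have := hle1 l hl
          have h1 : pvPrio n l ≠ 1 := by
            have := List.find?_eq_none.mp hfw1 l hl; simpa using this
          omega
        have hfold : labels.foldl (pvStep n) (0, "") = (0, "") :=
          pvFold_absorb n labels (0, "") h0
        simp [hfold]
      · have hfold : labels.foldl (pvStep n) (0, "") = (1, w1) :=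
          pvFold_first1 n labels (0, "") hle1 rfl w1 hfw1
        simp [hfold]
    · have hfold : labels.foldl (pvStep n) (0, "") = (2, w) :=
        pvFold_first2 n labels (0, "") hle2 (by simp) w hfw
      simp [hfold]

-- ===== VERDICT (by name: the statement is the Claim_ definition above) =====
theorem canonicalize_class_prediction_spec : Claim_equal_canonicalize_class_prediction := by
  intro prediction labels _
  unfold Spec_canonicalize_class_prediction canonicalize_class_prediction canonicalize_class_prediction_alt
  exact pvKey (PySem.Str.lower (pvClean prediction)) labels
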